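-- pv_equiv track=rewrite | github.com/hwakabh/codewars | python/6/EncryptThis/encrypt_this.py | encrypt_this
-- ===== SOURCE A (Python) =====
-- def encrypt_this(text):
--     w = text.split(' ')
--     ans = []
--
--     for i in w:
--         x = ''
--         if len(i) >= 3:
--             x = str(ord(i[0])) + i[len(i)-1:] + i[2:len(i)-1] + i[1]
--         elif len(i) == 3:
--             x = str(ord(i[0])) + i[len(i)-1:] + i[1]
--         elif len(i) == 2:
--             x = str(ord(i[0])) + i[1]
--         elif len(i) == 1:
--             x = str(ord(i[0]))
--         ans.append(x)
--
--     return ' '.join(ans)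
-- ===== SOURCE B (Python) =====
-- def _enc(word):
--     chars = list(word)
--     if chars:
--         chars[0] = str(ord(word[0]))
--     if len(word) >= 2:
--         chars[1], chars[-1] = chars[-1], chars[1]
--     return ''.join(chars)
--
--
-- def encrypt_this(text):
--     return ' '.join(_enc(w) for w in text.split(' '))
-- ===== Notes on version B (the rewrite author's own statement) =====
-- stated objective: simpler
-- what changed: A's four-way length-branch of slice-and-concatenate expressions is replaced by one uniform per-word transform: turn the word into a list of character chunks, set chunk 0 to str(ord(first)), swap chunks 1 and -1 when the word has at least two characters, and join.
import Mathlib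
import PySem

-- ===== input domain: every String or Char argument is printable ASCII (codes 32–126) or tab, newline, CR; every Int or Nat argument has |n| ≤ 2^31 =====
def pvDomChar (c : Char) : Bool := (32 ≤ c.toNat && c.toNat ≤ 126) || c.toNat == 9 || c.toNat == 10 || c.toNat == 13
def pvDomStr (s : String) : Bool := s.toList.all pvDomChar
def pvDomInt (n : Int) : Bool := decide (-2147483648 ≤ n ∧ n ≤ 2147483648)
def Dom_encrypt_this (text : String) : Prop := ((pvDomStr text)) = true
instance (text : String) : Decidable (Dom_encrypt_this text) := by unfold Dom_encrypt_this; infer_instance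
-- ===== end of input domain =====

-- B replaces A's four-way length-branch of slice concatenations by one uniform per-word
-- transform on the character list (set chars[0] to str(ord), swap chars[1] and chars[-1]); objective: simpler.

-- ===== PORT A =====
-- the body of A's for-loop over the words (the branches in A's order; len==3 is dead code, kept)
def pvEncWordA (i : List Char) : List Char :=
  if (i.length : Int) ≥ 3 then
    (PySem.Int.toStr ((PySem.List.pyGetD i 0 ' ').toNat)).toList
      ++ PySem.List.slice i (some ((i.length : Int) - 1)) none
      ++ PySem.List.slice i (some 2) (some ((i.length : Int) - 1))
      ++ [PySem.List.pyGetD i 1 ' ']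
  else if (i.length : Int) = 3 then
    (PySem.Int.toStr ((PySem.List.pyGetD i 0 ' ').toNat)).toList
      ++ PySem.List.slice i (some ((i.length : Int) - 1)) none
      ++ [PySem.List.pyGetD i 1 ' ']
  else if (i.length : Int) = 2 then
    (PySem.Int.toStr ((PySem.List.pyGetD i 0 ' ').toNat)).toList
      ++ [PySem.List.pyGetD i 1 ' ']
  else if (i.length : Int) = 1 then
    (PySem.Int.toStr ((PySem.List.pyGetD i 0 ' ').toNat)).toList
  else []

def encrypt_this (text : String) : String :=
  let w := PySem.Chars.splitOn text.toList [' ']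
  let ans := w.foldl (fun acc i => acc ++ [pvEncWordA i]) []
  String.ofList (PySem.Chars.join [' '] ans)

-- ===== PORT B =====
-- the per-word helper _enc of Source B: chars as a list of chunks, chars[0] := str(ord(word[0])),
-- then chars[1], chars[-1] = chars[-1], chars[1]; ''.join(chars)
def pvEncWordB (word : List Char) : List Char :=
  let chars : List (List Char) := word.map (fun c => [c])
  let chars :=
    if chars ≠ [] then
      chars.set 0 (PySem.Int.toStr ((PySem.List.pyGetD word 0 ' ').toNat)).toList
    else chars
  let chars :=
    if word.length ≥ 2 then
      let t1 := PySem.List.pyGetD chars (-1) []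
      let t2 := PySem.List.pyGetD chars 1 []
      PySem.List.pySetD (PySem.List.pySetD chars 1 t1) (-1) t2
    else chars
  PySem.Chars.join [] chars

def encrypt_this_alt (text : String) : String :=
  String.ofList (PySem.Chars.join [' '] ((PySem.Chars.splitOn text.toList [' ']).map pvEncWordB))

-- ===== PRECONDITION & SPEC =====
def Spec_encrypt_this (text : String) (out : String) : Prop := out = encrypt_this_alt text
instance (text : String) (out : String) : Decidable (Spec_encrypt_this text out) := by unfold Spec_encrypt_this; infer_instance

-- ===== CLAIM (what is proved, stated in full; the proofs are below) =====
def Claim_equal_encrypt_this : Prop := ∀ (text : String), Dom_encrypt_this text → Spec_encrypt_this text (encrypt_this text)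

-- ===== LEMMAS AND PROOFS =====

-- ''.join of B's chunk list is its concatenation
theorem pvJoinNilFlatten (xs : List (List Char)) : PySem.Chars.join [] xs = xs.flatten := by
  induction xs with
  | nil => rfl
  | cons h t ih => cases t <;> simp_all [PySem.Chars.join, List.intercalate]

theorem pvFlattenSingletons (mid : List Char) : (mid.map (fun c => [c])).flatten = mid := by
  induction mid <;> simp_all

-- B's chars[-1] = v assignment on a list presented as xs ++ [x]
theorem pvSetD_neg_one_append {α : Type} (xs : List α) (x v : α) :
    PySem.List.pySetD (xs ++ [x]) (-1) v = xs ++ [v] := by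
  simp [PySem.List.pySetD, PySem.List.pySet?, PySem.List.pyIdx?]

-- B on a word of length ≥ 3, written as a :: b :: mid ++ [z]
theorem pvB_big (a b z : Char) (mid : List Char) :
    pvEncWordB (a :: b :: (mid ++ [z])) =
      (PySem.Int.toStr (a.toNat : Int)).toList ++ z :: (mid ++ [b]) := by
  unfold pvEncWordB
  simp only [List.map_cons, List.map_append, List.map_nil, ne_eq, reduceCtorEq,
    not_false_eq_true, if_pos, List.set_cons_zero, List.length_cons, PySem.List.pyGetD_zero_cons]
  rw [if_pos (by simp)]
  generalize (PySem.Int.toStr ((a.toNat : Int))).toList = s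
  rw [show s :: [b] :: (mid.map (fun c => [c]) ++ [[z]]) =
        (s :: [b] :: mid.map (fun c => [c])) ++ [[z]] from by simp]
  rw [PySem.List.pyGetD_neg_one_append_singleton, PySem.List.pyGetD_ofNat']
  rw [PySem.List.pySetD_of_nonneg _ _ (by norm_num : (0:Int) ≤ 1)]
  rw [show ((s :: [b] :: mid.map (fun c => [c])) ++ [[z]]).set (1:Int).toNat [z] =
        (s :: [z] :: mid.map (fun c => [c])) ++ [[z]] from by simp]
  rw [show ((s :: [b] :: mid.map (fun c => [c])) ++ [[z]]).getD 1 [] = [b] from by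
        simp [List.getD]]
  rw [pvSetD_neg_one_append, pvJoinNilFlatten]
  simp [pvFlattenSingletons]

-- A on a word of length ≥ 3, written as a :: b :: mid ++ [z]
theorem pvA_big (a b z : Char) (mid : List Char) :
    pvEncWordA (a :: b :: (mid ++ [z])) =
      (PySem.Int.toStr (a.toNat : Int)).toList ++ z :: (mid ++ [b]) := by
  unfold pvEncWordA
  have hlen : (a :: b :: (mid ++ [z])).length = mid.length + 3 := by simp
  rw [hlen]
  rw [if_pos (by push_cast; omega)]
  rw [PySem.List.pyGetD_zero_cons, PySem.List.pyGetD_ofNat']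
  rw [show ((mid.length + 3 : Nat) : Int) - 1 = ((mid.length + 2 : Nat) : Int) from by push_cast; ring]
  rw [PySem.List.slice_from_natCast,
      PySem.List.slice_toNat]
  · simp [List.getD]
    rw [show (((mid.length : Int) + 2).toNat - 2) = mid.length from by omega]
    exact List.take_left' rfl
  · norm_num
  · positivity

-- the two per-word transforms agree on every word
theorem pvEncWord_eq (i : List Char) : pvEncWordA i = pvEncWordB i := by
  match i with
  | [] => rfl
  | [a] => simp [pvEncWordA, pvEncWordB, PySem.Chars.join, List.intercalate]
  | [a, b] =>
      simp [pvEncWordA, pvEncWordB, PySem.List.pyGetD, PySem.List.pyGet?,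
        PySem.List.pyIdx?, PySem.List.pySetD, PySem.List.pySet?, PySem.Chars.join, List.intercalate]
  | a :: b :: c :: rest =>
      obtain ⟨mid, z, hmz⟩ : ∃ mid z, c :: rest = mid ++ [z] := by
        obtain ⟨mid, z, h⟩ := (c :: rest).eq_nil_or_concat.resolve_left (by simp)
        exact ⟨mid, z, by simpa [List.concat_eq_append] using h⟩
      rw [show (a :: b :: c :: rest) = a :: b :: (mid ++ [z]) from by rw [← hmz]]
      rw [pvA_big, pvB_big]

-- ===== VERDICT (by name: the statement is the Claim_ definition above) =====
theorem encrypt_this_spec : Claim_equal_encrypt_this := by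
  intro text _
  show _ = _
  simp only [encrypt_this, encrypt_this_alt, PySem.List.foldl_append_singleton_eq_map]
  rw [funext pvEncWord_eq, List.nil_append]
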